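-- pv_equiv track=rewrite | github.com/brightlikethelight/LORE | src/monitors/ensemble.py | _parse_judge_names
-- ===== SOURCE A (Python) =====
-- def _parse_judge_names(names: list[str]) -> list[tuple[str, str]]:
--     """Parse model names to (provider, model_id) tuples."""
--     parsed = []
--     for name in names:
--         name_lower = name.lower()
--         if "claude" in name_lower or "anthropic" in name_lower:
--             parsed.append(("anthropic", name))
--         elif "gpt" in name_lower or "openai" in name_lower:
--             parsed.append(("openai", name))
--         elif "gemini" in name_lower or "google" in name_lower:
--             parsed.append(("google", name))
--         else:
--             # Default to OpenAI
--             parsed.append(("openai", name))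
--     return parsed
-- ===== SOURCE B (Python) =====
-- _KEYWORD_RANK = {
--     "claude": 0, "anthropic": 0,
--     "gpt": 1, "openai": 1,
--     "gemini": 2, "google": 2,
-- }
-- _PROVIDERS = ["anthropic", "openai", "google"]
--
--
-- def _provider_for(name: str) -> str:
--     low = name.lower()
--     ranks = [r for kw, r in _KEYWORD_RANK.items() if kw in low]
--     return _PROVIDERS[min(ranks, default=1)]
--
--
-- def _parse_judge_names(names: list[str]) -> list[tuple[str, str]]:
--     """Parse model names to (provider, model_id) tuples."""
--     return [(_provider_for(name), name) for name in names]
-- ===== Notes on version B (the rewrite author's own statement) =====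
-- stated objective: alternative
-- what changed: Instead of a short-circuiting if/elif cascade, B collects the ranks of ALL matching keywords for a name and selects the provider of the minimal rank (with default rank 1 = 'openai'), mapping this classifier over the list; min over all matches replaces first-match branching.
import Mathlib
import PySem

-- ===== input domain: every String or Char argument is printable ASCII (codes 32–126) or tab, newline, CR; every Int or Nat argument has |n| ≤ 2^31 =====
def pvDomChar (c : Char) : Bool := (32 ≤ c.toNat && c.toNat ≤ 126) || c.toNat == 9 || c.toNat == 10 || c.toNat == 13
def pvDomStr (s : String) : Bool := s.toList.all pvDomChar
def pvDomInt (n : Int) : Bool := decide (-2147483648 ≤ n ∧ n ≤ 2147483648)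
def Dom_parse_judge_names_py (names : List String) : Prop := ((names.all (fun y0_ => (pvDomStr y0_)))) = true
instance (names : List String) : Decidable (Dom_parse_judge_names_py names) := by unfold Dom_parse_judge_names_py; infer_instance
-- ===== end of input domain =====

-- B replaces A's short-circuit if/elif cascade by a ranked-match classifier: it collects the ranks of all matching keywords and indexes the provider of the minimal rank (default rank 1 = "openai"); same values, not faster.


-- ===== PORT A =====
-- Literal port of A: accumulator loop, per-name if/elif/else cascade on substring tests of the lowercased name.
def parse_judge_names_py (names : List String) : List (String × String) :=
  names.foldl (fun parsed name =>
    let name_lower := PySem.Str.lower name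
    if PySem.Str.isIn "claude" name_lower || PySem.Str.isIn "anthropic" name_lower then
      parsed ++ [("anthropic", name)]
    else if PySem.Str.isIn "gpt" name_lower || PySem.Str.isIn "openai" name_lower then
      parsed ++ [("openai", name)]
    else if PySem.Str.isIn "gemini" name_lower || PySem.Str.isIn "google" name_lower then
      parsed ++ [("google", name)]
    else
      parsed ++ [("openai", name)]) []

-- ===== PORT B =====
-- Port of B: keyword→rank table, list of providers indexed by rank.
def pvKeywordRank : List (String × Nat) :=
  [("claude", 0), ("anthropic", 0), ("gpt", 1), ("openai", 1), ("gemini", 2), ("google", 2)]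
def pvProviders : List String := ["anthropic", "openai", "google"]

-- min(ranks, default=1); _PROVIDERS[i]: the index is always < 3, so List.getD is exact here.
def pvProviderFor (name : String) : String :=
  let low := PySem.Str.lower name
  let ranks := (pvKeywordRank.filter (fun kr => PySem.Str.isIn kr.1 low)).map (·.2)
  pvProviders.getD (match ranks with | [] => 1 | r :: rs => rs.foldl min r) ""

def parse_judge_names_py_alt (names : List String) : List (String × String) :=
  names.map (fun name => (pvProviderFor name, name))

-- ===== PRECONDITION & SPEC =====
def Spec_parse_judge_names_py (names : List String) (out : List (String × String)) : Prop := out = parse_judge_names_py_alt names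
instance (names : List String) (out : List (String × String)) : Decidable (Spec_parse_judge_names_py names out) := by unfold Spec_parse_judge_names_py; infer_instance

-- ===== CLAIM (what is proved, stated in full; the proofs are below) =====
def Claim_equal_parse_judge_names_py : Prop := ∀ (names : List String), Dom_parse_judge_names_py names → Spec_parse_judge_names_py names (parse_judge_names_py names)

-- ===== LEMMAS AND PROOFS =====

-- Per-name agreement: A's cascade picks the same provider as B's min-rank classifier.
theorem prov_eq (name : String) :
    (let name_lower := PySem.Str.lower name
     if PySem.Str.isIn "claude" name_lower || PySem.Str.isIn "anthropic" name_lower then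
       ("anthropic", name)
     else if PySem.Str.isIn "gpt" name_lower || PySem.Str.isIn "openai" name_lower then
       ("openai", name)
     else if PySem.Str.isIn "gemini" name_lower || PySem.Str.isIn "google" name_lower then
       ("google", name)
     else
       ("openai", name)) = (pvProviderFor name, name) := by
  unfold pvProviderFor
  set low := PySem.Str.lower name with hlow
  by_cases h1 : PySem.Str.isIn "claude" low = true <;>
  by_cases h2 : PySem.Str.isIn "anthropic" low = true <;>
  by_cases h3 : PySem.Str.isIn "gpt" low = true <;>
  by_cases h4 : PySem.Str.isIn "openai" low = true <;>
  by_cases h5 : PySem.Str.isIn "gemini" low = true <;>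
  by_cases h6 : PySem.Str.isIn "google" low = true <;>
  simp only [pvKeywordRank, List.filter_cons, List.filter_nil, h1, h2, h3, h4, h5, h6] <;>
  simp [pvProviders]

theorem foldl_acc (names : List String) (acc : List (String × String)) :
    names.foldl (fun parsed name =>
      let name_lower := PySem.Str.lower name
      if PySem.Str.isIn "claude" name_lower || PySem.Str.isIn "anthropic" name_lower then
        parsed ++ [("anthropic", name)]
      else if PySem.Str.isIn "gpt" name_lower || PySem.Str.isIn "openai" name_lower then
        parsed ++ [("openai", name)]
      else if PySem.Str.isIn "gemini" name_lower || PySem.Str.isIn "google" name_lower then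
        parsed ++ [("google", name)]
      else
        parsed ++ [("openai", name)]) acc = acc ++ names.map (fun name => (pvProviderFor name, name)) := by
  induction names generalizing acc with
  | nil => simp
  | cons n rest ih =>
    simp only [List.foldl_cons, List.map_cons, ih]
    have h := prov_eq n
    by_cases h1 : (PySem.Str.isIn "claude" (PySem.Str.lower n) || PySem.Str.isIn "anthropic" (PySem.Str.lower n)) = true <;>
    by_cases h2 : (PySem.Str.isIn "gpt" (PySem.Str.lower n) || PySem.Str.isIn "openai" (PySem.Str.lower n)) = true <;>
    by_cases h3 : (PySem.Str.isIn "gemini" (PySem.Str.lower n) || PySem.Str.isIn "google" (PySem.Str.lower n)) = true <;>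
    simp only [h1, h2, h3, if_true] at h ⊢ <;>
    simp_all

-- ===== VERDICT (by name: the statement is the Claim_ definition above) =====
theorem parse_judge_names_py_spec : Claim_equal_parse_judge_names_py := by
  intro names _
  unfold Spec_parse_judge_names_py parse_judge_names_py parse_judge_names_py_alt
  simpa using foldl_acc names []
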